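-- pv_equiv track=rewrite | github.com/LIKONG709394/deep-learning-group-project | catcher/src/ocr.py | _drop_subsumed
-- ===== SOURCE A (Python) =====
-- from typing import Any, Dict, List, Tuple
--
-- def _drop_subsumed(lines: List[str], min_len: int = 8) -> List[str]:
--     """
--     Drop a line if it is fully contained inside another longer line.
--     """
--     kept: List[str] = []
--     lowered = [(line, line.casefold()) for line in lines]
--
--     for i, (line_i, low_i) in enumerate(lowered):
--         if len(low_i) < min_len:
--             kept.append(line_i)
--             continue
--
--         is_subsumed = False
--         for j, (_, low_j) in enumerate(lowered):
--             if i == j: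
--                 continue
--             if len(low_j) <= len(low_i):
--                 continue
--             if low_i in low_j:
--                 is_subsumed = True
--                 break
--
--         if not is_subsumed:
--             kept.append(line_i)
--
--     return kept
-- ===== SOURCE B (Python) =====
-- from typing import List
--
-- def _drop_subsumed(lines: List[str], min_len: int = 8) -> List[str]:
--     """Drop a line if it is fully contained inside another longer line.
--
--     Different algorithm: only a text strictly longer than min_len can subsume
--     anything, so first build, longest-first, the antichain of 'maximal' such
--     distinct casefolded texts (a text is skipped when it already sits inside a
--     kept strictly longer text); by transitivity of substring containment a line
--     is subsumed iff its casefold sits inside a strictly longer maximal text, so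
--     the final pass tests each line only against the maximal antichain.
--     """
--     maximal: List[str] = []
--     candidates = [t for t in {line.casefold() for line in lines} if len(t) > min_len]
--     for t in sorted(candidates, key=len, reverse=True):
--         if not any(len(t) < len(u) and t in u for u in maximal):
--             maximal.append(t)
--
--     def keep(line: str) -> bool:
--         low = line.casefold()
--         return len(low) < min_len or not any(
--             len(low) < len(u) and low in u for u in maximal)
--
--     return [line for line in lines if keep(line)]
-- ===== Notes on version B (the rewrite author's own statement) =====
-- stated objective: alternative
-- what changed: Instead of A's all-pairs scan with i==j bookkeeping, B builds (longest-first) a maximal antichain of the distinct casefolded texts longer than min_len -- skipping a text already contained in a kept longer one -- and then filters the lines against that antichain only; correctness rests on transitivity of substring containment and on the fact that only texts longer than min_len can subsume anything.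
import Mathlib
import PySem

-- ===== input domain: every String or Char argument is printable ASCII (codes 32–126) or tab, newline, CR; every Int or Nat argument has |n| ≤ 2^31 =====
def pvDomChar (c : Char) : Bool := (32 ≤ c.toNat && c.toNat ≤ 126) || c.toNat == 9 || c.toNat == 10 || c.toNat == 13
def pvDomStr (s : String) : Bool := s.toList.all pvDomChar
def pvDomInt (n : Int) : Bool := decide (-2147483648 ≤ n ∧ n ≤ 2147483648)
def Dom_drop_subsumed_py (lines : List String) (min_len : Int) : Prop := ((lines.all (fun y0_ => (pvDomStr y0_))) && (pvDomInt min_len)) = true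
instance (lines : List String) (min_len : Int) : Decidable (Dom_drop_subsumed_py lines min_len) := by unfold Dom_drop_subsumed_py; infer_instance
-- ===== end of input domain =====

-- B replaces A's all-pairs scan by: build a maximal antichain of the distinct
-- casefolded texts (longest first), then filter the lines against it
-- (alternative decomposition; correctness via transitivity of substring containment).
-- 'casefold' is ported as PySem.Str.lower, exact on the ASCII domain above.

-- ===== PORT A =====
def drop_subsumed_py (lines : List String) (min_len : Int) : List String :=
  let lowered := lines.map (fun line => (line, PySem.Str.lower line))
  (PySem.List.enumerate lowered).foldl (fun kept p =>
    if PySem.Str.len p.2.2 < min_len then kept ++ [p.2.1]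
    else
      let is_subsumed := (PySem.List.enumerate lowered).any (fun q =>
        !(q.1 == p.1) && !(PySem.Str.len q.2.2 ≤ PySem.Str.len p.2.2) &&
          PySem.Str.isIn p.2.2 q.2.2)
      if is_subsumed then kept else kept ++ [p.2.1]) []

-- ===== PORT B =====
def drop_subsumed_py_alt (lines : List String) (min_len : Int) : List String :=
  let candidates := (PySem.Set.ofList (lines.map (fun line => PySem.Str.lower line))).filter
    (fun t => decide (min_len < PySem.Str.len t))
  let maximal := (PySem.List.sorted candidates (fun t => PySem.Str.len t) true).foldl
    (fun maximal t =>
      if maximal.any (fun u =>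
          decide (PySem.Str.len t < PySem.Str.len u) && PySem.Str.isIn t u)
      then maximal else maximal ++ [t]) []
  lines.filter (fun line =>
    let low := PySem.Str.lower line
    decide (PySem.Str.len low < min_len) ||
      !(maximal.any (fun u =>
          decide (PySem.Str.len low < PySem.Str.len u) && PySem.Str.isIn low u)))

-- ===== PRECONDITION & SPEC =====
def Spec_drop_subsumed_py (lines : List String) (min_len : Int) (out : List String) : Prop := out = drop_subsumed_py_alt lines min_len
instance (lines : List String) (min_len : Int) (out : List String) : Decidable (Spec_drop_subsumed_py lines min_len out) := by unfold Spec_drop_subsumed_py; infer_instance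

-- ===== CLAIM (what is proved, stated in full; the proofs are below) =====
def Claim_equal_drop_subsumed_py : Prop := ∀ (lines : List String) (min_len : Int), Dom_drop_subsumed_py lines min_len → Spec_drop_subsumed_py lines min_len (drop_subsumed_py lines min_len)

-- ===== LEMMAS AND PROOFS =====

def pvLowered (lines : List String) : List (String × String) :=
  lines.map (fun line => (line, PySem.Str.lower line))

def pvInner (lines : List String) (i : Int) (low : String) : Bool :=
  (PySem.List.enumerate (pvLowered lines)).any (fun q =>
    !(q.1 == i) && !(PySem.Str.len q.2.2 ≤ PySem.Str.len low) && PySem.Str.isIn low q.2.2)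

def pvKeepA (lines : List String) (min_len : Int) (p : Int × String × String) : Bool :=
  decide (PySem.Str.len p.2.2 < min_len) || !pvInner lines p.1 p.2.2

def pvSetAny (lines : List String) (low : String) : Bool :=
  (PySem.Set.ofList (lines.map (fun line => PySem.Str.lower line))).any (fun o =>
    decide (PySem.Str.len low < PySem.Str.len o) && PySem.Str.isIn low o)

-- B's inner test against a list of texts
def pvAnyIn (M : List String) (low : String) : Bool :=
  M.any (fun u => decide (PySem.Str.len low < PySem.Str.len u) && PySem.Str.isIn low u)

-- B's antichain-building step
def pvStep (maximal : List String) (t : String) : List String :=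
  if pvAnyIn maximal t then maximal else maximal ++ [t]

def pvMaximal (lines : List String) (min_len : Int) : List String :=
  (PySem.List.sorted
      ((PySem.Set.ofList (lines.map (fun line => PySem.Str.lower line))).filter
        (fun t => decide (min_len < PySem.Str.len t)))
      (fun t => PySem.Str.len t) true).foldl pvStep []

def pvKeepB (lines : List String) (min_len : Int) (line : String) : Bool :=
  decide (PySem.Str.len (PySem.Str.lower line) < min_len) ||
    !(pvAnyIn (pvMaximal lines min_len) (PySem.Str.lower line))

-- elements of the fold result come from the accumulator or the processed list
lemma pvFold_subset (P : List String) (acc : List String) :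
    ∀ x ∈ P.foldl pvStep acc, x ∈ acc ∨ x ∈ P := by
  induction P generalizing acc with
  | nil => intro x hx; exact Or.inl hx
  | cons p P ih =>
    intro x hx
    rcases ih (pvStep acc p) x hx with h | h
    · unfold pvStep at h
      split at h
      · exact Or.inl h
      · rcases List.mem_append.mp h with h | h
        · exact Or.inl h
        · exact Or.inr (by simp at h; simp [h])
    · exact Or.inr (List.mem_cons_of_mem _ h)

-- the accumulator survives the fold
lemma pvFold_mono (P : List String) (acc : List String) :
    ∀ x ∈ acc, x ∈ P.foldl pvStep acc := by
  induction P generalizing acc with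
  | nil => intro x hx; exact hx
  | cons p P ih =>
    intro x hx
    apply ih (pvStep acc p) x
    unfold pvStep
    split
    · exact hx
    · exact List.mem_append_left _ hx

-- every processed text is covered (≤-length infix) by some element of the fold result
lemma pvFold_cover (P : List String) (acc : List String) :
    ∀ t ∈ P, ∃ u ∈ P.foldl pvStep acc,
      t.toList.length ≤ u.toList.length ∧ t.toList <:+: u.toList := by
  induction P generalizing acc with
  | nil => intro t ht; cases ht
  | cons p P ih =>
    intro t ht
    rcases List.mem_cons.mp ht with rfl | ht
    · by_cases h : pvAnyIn acc t = true
      · rcases List.any_eq_true.mp h with ⟨u, hu, hcond⟩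
        simp only [Bool.and_eq_true, decide_eq_true_eq, PySem.Str.len_eq] at hcond
        refine ⟨u, ?_, ?_, ?_⟩
        · exact pvFold_mono P (pvStep acc t) u (by unfold pvStep; rw [if_pos h]; exact hu)
        · exact le_of_lt (by exact_mod_cast hcond.1)
        · exact (PySem.Str.isIn_iff_infix _ _).mp hcond.2
      · refine ⟨t, ?_, le_refl _, List.infix_refl _⟩
        exact pvFold_mono P (pvStep acc t) t
          (by unfold pvStep; rw [if_neg h]; exact List.mem_append_right _ (List.mem_singleton.mpr rfl))
    · exact ih (pvStep acc p) t ht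

-- the scan over all distinct texts and the scan over the maximal antichain agree
lemma pvSetAny_eq_anyIn_maximal (lines : List String) (min_len : Int) (low : String)
    (hmin : min_len ≤ PySem.Str.len low) :
    pvSetAny lines low = pvAnyIn (pvMaximal lines min_len) low := by
  apply Bool.eq_iff_iff.mpr
  simp only [pvSetAny, pvAnyIn, List.any_eq_true, Bool.and_eq_true, decide_eq_true_eq,
    PySem.Str.len_eq]
  constructor
  · rintro ⟨t, ht, hlen, hin⟩
    have htf : t ∈ (PySem.Set.ofList (lines.map (fun line => PySem.Str.lower line))).filter
        (fun t => decide (min_len < PySem.Str.len t)) := by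
      refine List.mem_filter.mpr ⟨ht, ?_⟩
      simp only [PySem.Str.len_eq] at hmin ⊢
      simp only [decide_eq_true_eq]
      have : (low.toList.length : Int) < t.toList.length := by exact_mod_cast hlen
      omega
    have ht' : t ∈ PySem.List.sorted
        ((PySem.Set.ofList (lines.map (fun line => PySem.Str.lower line))).filter
          (fun t => decide (min_len < PySem.Str.len t)))
        (fun t => PySem.Str.len t) true := (PySem.List.mem_sorted _ _ _ _).mpr htf
    obtain ⟨u, hu, hle, hinf⟩ := pvFold_cover _ [] t ht'
    refine ⟨u, hu, ?_, ?_⟩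
    · have h1 : low.toList.length < t.toList.length := by exact_mod_cast hlen
      have : low.toList.length < u.toList.length := lt_of_lt_of_le h1 hle
      exact_mod_cast this
    · exact (PySem.Str.isIn_iff_infix _ _).mpr
        (((PySem.Str.isIn_iff_infix _ _).mp hin).trans hinf)
  · rintro ⟨u, hu, hlen, hin⟩
    rcases pvFold_subset _ [] u hu with h | h
    · cases h
    · exact ⟨u, (List.mem_filter.mp ((PySem.List.mem_sorted _ _ _ _).mp h)).1, hlen, hin⟩

lemma pvInner_eq_setAny (lines : List String) (k : Nat) (hk : k < lines.length) :
    pvInner lines (k : Int) (PySem.Str.lower (lines[k])) = pvSetAny lines (PySem.Str.lower (lines[k])) := by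
  apply Bool.eq_iff_iff.mpr
  simp only [pvInner, pvSetAny, List.any_eq_true]
  constructor
  · rintro ⟨q, hq, hcond⟩
    rw [PySem.List.mem_enumerate_iff] at hq
    obtain ⟨j, hj, rfl⟩ := hq
    have hj' : j < lines.length := by simpa [pvLowered] using hj
    simp only [pvLowered, List.getElem_map] at hcond
    simp only [Bool.and_eq_true, Bool.not_eq_true', decide_eq_false_iff_not, not_le] at hcond
    obtain ⟨⟨_, hlen⟩, hin⟩ := hcond
    refine ⟨PySem.Str.lower (lines[j]'hj'), ?_, ?_⟩
    · rw [PySem.Set.mem_ofList]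
      exact List.mem_map_of_mem (List.getElem_mem hj')
    · simp only [Bool.and_eq_true, decide_eq_true_eq]
      exact ⟨hlen, hin⟩
  · rintro ⟨o, ho, hcond⟩
    rw [PySem.Set.mem_ofList, List.mem_map] at ho
    obtain ⟨l, hl, rfl⟩ := ho
    obtain ⟨j, hj, rfl⟩ := List.mem_iff_getElem.mp hl
    simp only [Bool.and_eq_true, decide_eq_true_eq] at hcond
    have hj2 : j < (pvLowered lines).length := by simpa [pvLowered] using hj
    have hjk : j ≠ k := by
      intro h; subst h
      exact lt_irrefl _ hcond.1
    refine ⟨((0 : Int) + (j : Nat), (pvLowered lines)[j]'hj2), ?_, ?_⟩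
    · rw [PySem.List.mem_enumerate_iff]
      exact ⟨j, hj2, rfl⟩
    · simp only [pvLowered, List.getElem_map, Bool.and_eq_true, Bool.not_eq_true',
        decide_eq_false_iff_not, not_le, beq_eq_false_iff_ne]
      exact ⟨⟨by omega, hcond.1⟩, hcond.2⟩

lemma pv_enum_filter_map {α : Type} (xs : List α) (s : Int) (r : α → Bool) :
    ((PySem.List.enumerate xs s).filter (fun p => r p.2)).map (·.2) = xs.filter r := by
  induction xs generalizing s with
  | nil => simp [PySem.List.enumerate_nil]
  | cons x xs ih =>
    rw [PySem.List.enumerate_cons]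
    by_cases h : r x <;> simp [h, ih]

lemma pv_main (lines : List String) (min_len : Int) :
    drop_subsumed_py lines min_len = drop_subsumed_py_alt lines min_len := by
  unfold drop_subsumed_py drop_subsumed_py_alt
  rw [List.foldl_ext _
    (fun kept p => if pvKeepA lines min_len p = true then kept ++ [p.2.1] else kept) []
    (fun kept p _ => by
      show (if PySem.Str.len p.2.2 < min_len then kept ++ [p.2.1]
            else if pvInner lines p.1 p.2.2 = true then kept else kept ++ [p.2.1])
          = (if pvKeepA lines min_len p = true then kept ++ [p.2.1] else kept)
      by_cases h1 : PySem.Str.len p.2.2 < min_len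
      · rw [if_pos h1, if_pos (by
          simp only [pvKeepA, Bool.or_eq_true, decide_eq_true_eq]
          exact Or.inl h1)]
      · rw [if_neg h1]
        cases hb : pvInner lines p.1 p.2.2
        · rw [if_neg (by simp), if_pos (by
            simp only [pvKeepA, hb, Bool.not_false, Bool.or_true])]
        · rw [if_pos rfl, if_neg (by
            simp only [pvKeepA, hb, Bool.not_true, Bool.or_false, decide_eq_true_eq]
            exact h1)])]
  rw [show (lines.map (fun line => (line, PySem.Str.lower line))) = pvLowered lines from rfl]
  rw [PySem.List.foldl_append_if (p := pvKeepA lines min_len) (f := fun p => p.2.1)]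
  rw [List.nil_append]
  rw [List.filter_congr (q := fun p => pvKeepB lines min_len p.2.1)
    (fun p hp => by
      rw [PySem.List.mem_enumerate_iff] at hp
      obtain ⟨k, hk, rfl⟩ := hp
      have hk' : k < lines.length := by simpa [pvLowered] using hk
      simp only [pvLowered, List.getElem_map, pvKeepA, pvKeepB]
      rw [show ((0 : Int) + (k : Nat)) = (k : Int) by ring]
      rw [pvInner_eq_setAny lines k hk']
      by_cases hc : PySem.Str.len (PySem.Str.lower (lines[k]'hk')) < min_len
      · simp only [PySem.Str.len_eq, PySem.Str.toList_lower] at hc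
        simp [hc]
      · rw [pvSetAny_eq_anyIn_maximal lines min_len _ (le_of_not_gt hc)])]
  rw [show (fun p : Int × String × String => p.2.1)
      = (fun x : String × String => x.1) ∘ (fun p : Int × String × String => p.2) from rfl]
  rw [← List.map_map]
  rw [pv_enum_filter_map (pvLowered lines) 0 (fun x => pvKeepB lines min_len x.1)]
  rw [show pvLowered lines = lines.map (fun l => (l, PySem.Str.lower l)) from rfl]
  rw [List.filter_map, List.map_map]
  simp only [Function.comp_def]
  rw [List.map_id']
  rfl

-- ===== VERDICT (by name: the statement is the Claim_ definition above) =====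
theorem drop_subsumed_py_spec : Claim_equal_drop_subsumed_py := by
  intro lines min_len _
  unfold Spec_drop_subsumed_py
  exact pv_main lines min_len
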